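-- pv_equiv track=rewrite | github.com/Dibrary/Algorithm_playground | Programmers/스킬체크 테스트 레벨2-2(함수형 연관)(실패).py | minus
-- ===== SOURCE A (Python) =====
-- def calc(a, op, b): # 실제 연산만 처리용
--     if op == "*":
--         return int(a) * int(b)
--     elif op == "+":
--         return int(a) + int(b)
--     else:
--         return int(a) - int(b)
--
-- def minus(values):
--     while values.count("-") != 0:
--         idx = values.index("-")
--         value = str(calc(values[idx - 1], "-", values[idx + 1]))
--         values.pop(idx - 1)
--         values.pop(idx - 1)
--         values.pop(idx - 1)
--         values.insert(idx - 1, value)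
--     return values
-- ===== SOURCE B (Python) =====
-- def minus(values):
--     # Single left-to-right pass: fold each '-' into the running output list.
--     # Mutates `values` in place (values[:] = out) like A does, and returns it.
--     out = []
--     pending = False
--     for tok in values:
--         if pending:
--             out[-1] = str(int(out[-1]) - int(tok))
--             pending = False
--         elif tok == "-":
--             pending = True
--         else:
--             out.append(tok)
--     values[:] = out
--     return values
-- ===== Notes on version B (the rewrite author's own statement) =====
-- stated objective: alternative
-- what changed: Replaces the repeated count/index/pop/pop/pop/insert rescans of the whole list (one full splice per '-') by a single left-to-right pass that folds each subtraction into the last element of a growing output list.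
-- outside the precondition, e.g. on minus(['-', '1', '2']): A returns ['1'], B raises IndexError; on minus(['-', '-3', ' 7 ']): A returns ['10'], B raises IndexError
import Mathlib
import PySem

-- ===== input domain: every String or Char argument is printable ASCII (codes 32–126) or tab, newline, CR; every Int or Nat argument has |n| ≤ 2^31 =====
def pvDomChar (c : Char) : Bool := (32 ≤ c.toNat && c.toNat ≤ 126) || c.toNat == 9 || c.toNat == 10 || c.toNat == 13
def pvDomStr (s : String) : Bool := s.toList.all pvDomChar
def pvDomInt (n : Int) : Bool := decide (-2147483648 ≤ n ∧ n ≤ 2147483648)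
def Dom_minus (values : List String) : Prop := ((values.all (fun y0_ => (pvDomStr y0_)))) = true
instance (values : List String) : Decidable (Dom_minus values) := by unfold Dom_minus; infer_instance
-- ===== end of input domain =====

-- B replaces A's repeated whole-list rescans (count/index + three pops + insert per '-') by one
-- left-to-right pass folding each subtraction into the last output element (objective: alternative).
-- Both Pythons mutate `values` in place to the returned list; the theorems below are about the return value.

-- ===== PORT A =====
-- helper `calc` of A; `none` = the ValueError of int() (Python raises there)
def calcPort (a : String) (op : String) (b : String) : Option Int :=
  if op = "*" then
    match PySem.Int.ofStr? a, PySem.Int.ofStr? b with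
    | some x, some y => some (x * y)
    | _, _ => none
  else if op = "+" then
    match PySem.Int.ofStr? a, PySem.Int.ofStr? b with
    | some x, some y => some (x + y)
    | _, _ => none
  else
    match PySem.Int.ofStr? a, PySem.Int.ofStr? b with
    | some x, some y => some (x - y)
    | _, _ => none

-- A's while-loop; `none` = an exception escapes the loop (IndexError/ValueError)
def minusGo (values : List String) : Option (List String) :=
  if PySem.List.count values "-" ≠ 0 then
    match PySem.List.index? values "-" with
    | none => some values   -- unreachable: count ≠ 0 means "-" is present
    | some idx =>
      match PySem.List.pyGet? values ((idx : Int) - 1) with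
      | none => none
      | some a =>
        match PySem.List.pyGet? values ((idx : Int) + 1) with
        | none => none
        | some b =>
          match calcPort a "-" b with
          | none => none
          | some c =>
            match hp1 : PySem.List.pop? values ((idx : Int) - 1) with
            | none => none
            | some (_, l1) =>
              match hp2 : PySem.List.pop? l1 ((idx : Int) - 1) with
              | none => none
              | some (_, l2) =>
                match hp3 : PySem.List.pop? l2 ((idx : Int) - 1) with
                | none => none
                | some (_, l3) =>
                  minusGo (PySem.List.insert l3 ((idx : Int) - 1) (PySem.Int.toStr c))
  else some values
termination_by values.length
decreasing_by
  have h1 : l1.length + 1 = values.length := PySem.List.length_of_pop?_eq_some values hp1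
  have h2 : l2.length + 1 = l1.length := PySem.List.length_of_pop?_eq_some l1 hp2
  have h3 : l3.length + 1 = l2.length := PySem.List.length_of_pop?_eq_some l2 hp3
  have h4 := PySem.List.length_insert l3 ((idx : Int) - 1) (PySem.Int.toStr c)
  omega

def minus (values : List String) : List String :=
  (minusGo values).getD values

-- ===== PORT B =====
-- one step of B's for-loop; state = some (out, pending), none = an exception was raised
def altStep (st : Option (List String × Bool)) (tok : String) : Option (List String × Bool) :=
  match st with
  | none => none
  | some (out, pending) =>
    if pending then
      match out.getLast? with
      | none => none          -- out[-1] on empty out: IndexError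
      | some last =>
        match PySem.Int.ofStr? last, PySem.Int.ofStr? tok with
        | some x, some y => some (out.dropLast ++ [PySem.Int.toStr (x - y)], false)
        | _, _ => none        -- int() ValueError
    else if tok = "-" then some (out, true)
    else some (out ++ [tok], false)

def minus_alt (values : List String) : List String :=
  match values.foldl altStep (some ([], false)) with
  | some (out, _) => out
  | none => values

-- ===== PRECONDITION & SPEC =====
-- Pre_ excludes exactly the inputs on which Python A raises (a '-' whose neighbour does not parse
-- as an int, or a '-' too close to either end), together with the leading-'-' corner where A returns
-- a value only through Python's negative-index wraparound (values[idx-1] reading values[-1]); B's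
-- single pass naturally raises IndexError there.
def Pre_minus (values : List String) : Prop :=
  ∀ i < values.length, values.getD i "" = "-" →
    0 < i ∧ i + 1 < values.length ∧
    (PySem.Int.ofStr? (values.getD (i - 1) "")).isSome = true ∧
    (PySem.Int.ofStr? (values.getD (i + 1) "")).isSome = true
instance (values : List String) : Decidable (Pre_minus values) := by unfold Pre_minus; infer_instance

def pvWitness_minus : List String := ["3", "-", "1", "-", "2"]

def Spec_minus (values : List String) (out : List String) : Prop := out = minus_alt values
instance (values : List String) (out : List String) : Decidable (Spec_minus values out) := by unfold Spec_minus; infer_instance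

-- ===== CLAIM (what is proved, stated in full; the proofs are below) =====
def Claim_equal_minus : Prop := ∀ (values : List String), Dom_minus values → Pre_minus values → Spec_minus values (minus values)

-- ===== LEMMAS AND PROOFS =====

-- the weak invariant actually needed by the induction: every '-' is away from both ends
def Wm (values : List String) : Prop :=
  ∀ i < values.length, values.getD i "" = "-" → 0 < i ∧ i + 1 < values.length

lemma fold_none (l : List String) : l.foldl altStep none = none := by
  induction l with
  | nil => rfl
  | cons x t ih => simpa [altStep] using ih

lemma fold_no_minus (l : List String) (out : List String) (h : "-" ∉ l) :
    l.foldl altStep (some (out, false)) = some (out ++ l, false) := by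
  induction l generalizing out with
  | nil => simp
  | cons x t ih =>
    have hx : x ≠ "-" := fun e => h (e ▸ List.mem_cons_self)
    have ht : "-" ∉ t := fun m => h (List.mem_cons_of_mem _ m)
    simp only [List.foldl_cons]
    rw [show altStep (some (out, false)) x = some (out ++ [x], false) from by simp [altStep, hx]]
    rw [ih (out ++ [x]) ht]
    simp

lemma tdc_head (f : Nat) : ∀ (n : Nat) (acc : List Char),
    ∃ d rest, Nat.toDigitsCore 10 (f + 1) n acc = Nat.digitChar d :: rest ∧ d < 10 := by
  induction f with
  | zero =>
    intro n acc
    refine ⟨n % 10, acc, ?_, Nat.mod_lt _ (by norm_num)⟩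
    simp only [Nat.toDigitsCore]
    split <;> rfl
  | succ f ih =>
    intro n acc
    by_cases h : n / 10 = 0
    · exact ⟨n % 10, acc, by simp only [Nat.toDigitsCore]; rw [if_pos h], Nat.mod_lt _ (by norm_num)⟩
    · obtain ⟨d, rest, he, hd⟩ := ih (n / 10) (Nat.digitChar (n % 10) :: acc)
      exact ⟨d, rest, by simp only [Nat.toDigitsCore]; rw [if_neg h]; exact he, hd⟩

lemma toStr_ne_minus (n : Int) : PySem.Int.toStr n ≠ "-" := by
  intro h
  have h2 : (PySem.Int.toStr n).toList = ['-'] := by rw [h]; rfl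
  rw [PySem.Int.toList_toStr] at h2
  unfold PySem.Int.toChars at h2
  split at h2
  · obtain ⟨d, rest, he, hd⟩ := tdc_head n.natAbs n.natAbs []
    rw [show Nat.toDigits 10 n.natAbs = Nat.toDigitsCore 10 (n.natAbs + 1) n.natAbs [] from rfl] at h2
    rw [he] at h2
    simp at h2
  · obtain ⟨d, rest, he, hd⟩ := tdc_head n.toNat n.toNat []
    rw [show Nat.toDigits 10 n.toNat = Nat.toDigitsCore 10 (n.toNat + 1) n.toNat [] from rfl] at h2
    rw [he] at h2
    have hdc : Nat.digitChar d = '-' := (List.cons.injEq _ _ _ _ ▸ h2).1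
    interval_cases d <;> simp_all [Nat.digitChar]

lemma ofStr_minus_none : PySem.Int.ofStr? "-" = none := by decide

lemma eraseIdx_at (q : List String) (y : String) (t : List String) :
    (q ++ y :: t).eraseIdx q.length = q ++ t := by
  induction q with
  | nil => rfl
  | cons h q ih => simpa using ih

lemma pop_at (q : List String) (y : String) (t : List String) :
    PySem.List.pop? (q ++ y :: t) ((q.length : Int)) = some (y, q ++ t) := by
  rw [PySem.List.pop?_natCast _ q.length (by simp)]
  have h1 : (q ++ y :: t)[q.length]'(by simp) = y := by
    rw [List.getElem_append_right le_rfl]; simp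
  rw [eraseIdx_at]
  simp [h1]

lemma fold_comm (q : List String) (a b : String) (rest : List String) (x y : Int)
    (hq : "-" ∉ q) (ha : PySem.Int.ofStr? a = some x) (hb : PySem.Int.ofStr? b = some y) :
    (q ++ a :: "-" :: b :: rest).foldl altStep (some ([], false))
      = (q ++ PySem.Int.toStr (x - y) :: rest).foldl altStep (some ([], false)) := by
  have hane : a ≠ "-" := by
    intro e; rw [e, ofStr_minus_none] at ha; cases ha
  have hvne : PySem.Int.toStr (x - y) ≠ "-" := toStr_ne_minus (x - y)
  rw [List.foldl_append, List.foldl_append, fold_no_minus q [] hq]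
  simp only [List.nil_append, List.foldl_cons]
  rw [show altStep (some (q, false)) a = some (q ++ [a], false) from by simp [altStep, hane]]
  rw [show altStep (some (q ++ [a], false)) "-" = some (q ++ [a], true) from by simp [altStep]]
  rw [show altStep (some (q ++ [a], true)) b
        = some (q ++ [PySem.Int.toStr (x - y)], false) from by
      simp [altStep, ha, hb]]
  rw [show altStep (some (q, false)) (PySem.Int.toStr (x - y))
        = some (q ++ [PySem.Int.toStr (x - y)], false) from by simp [altStep, hvne]]

lemma W_step (q : List String) (a v b : String) (rest : List String)
    (hq : "-" ∉ q) (hv : v ≠ "-")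
    (hw : Wm (q ++ a :: "-" :: b :: rest)) : Wm (q ++ v :: rest) := by
  intro i hi hgi
  have hlnew : (q ++ v :: rest).length = q.length + 1 + rest.length := by simp; omega
  have hlold : (q ++ a :: "-" :: b :: rest).length = q.length + 3 + rest.length := by simp; omega
  rcases lt_trichotomy i q.length with hlt | heq | hgt
  · exfalso
    rw [List.getD_append _ _ _ _ hlt] at hgi
    have hmem : q.getD i "" ∈ q := by
      rw [List.getD_eq_getElem q "" hlt]; exact List.getElem_mem hlt
    exact hq (hgi ▸ hmem)
  · exfalso
    rw [heq, List.getD_append_right _ _ _ _ le_rfl] at hgi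
    simp at hgi
    exact hv hgi
  · have hik : i = q.length + 1 + (i - q.length - 1) := by omega
    set k := i - q.length - 1 with hkdef
    have hgi' : rest.getD k "" = "-" := by
      rw [List.getD_append_right _ _ _ _ (by omega)] at hgi
      rw [show i - q.length = k + 1 from by omega] at hgi
      simpa using hgi
    have hkr : k < rest.length := by rw [hlnew] at hi; omega
    have hj : (q ++ a :: "-" :: b :: rest).getD (q.length + 3 + k) "" = "-" := by
      rw [List.getD_append_right _ _ _ _ (by omega)]
      rw [show q.length + 3 + k - q.length = k + 3 from by omega]
      simpa using hgi'
    have hwj := hw (q.length + 3 + k) (by omega) hj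
    rw [hlold] at hwj
    constructor
    · omega
    · rw [hlnew]; omega

lemma M : ∀ (n : Nat) (values : List String), values.length ≤ n → Wm values →
    values.foldl altStep (some ([], false)) = (minusGo values).map (fun o => (o, false)) := by
  intro n
  induction n with
  | zero =>
    intro values hlen hw
    have hnil : values = [] := by cases values <;> simp_all
    subst hnil
    rw [minusGo]
    simp
  | succ n ih =>
    intro values hlen hw
    by_cases hc : PySem.List.count values "-" = 0
    · have hnm : "-" ∉ values := by
        rw [PySem.List.count_eq] at hc
        exact fun m => by have := List.count_pos_iff.2 m; omega
      rw [fold_no_minus values [] hnm, minusGo, if_neg (by simpa using hc)]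
      simp
    · have hmem : "-" ∈ values := by
        rw [PySem.List.count_eq] at hc
        exact List.count_pos_iff.1 (by omega)
      obtain ⟨idx, hidx⟩ := Option.isSome_iff_exists.1 ((PySem.List.index?_isSome_iff values "-").2 hmem)
      obtain ⟨pre, suf, hsplit, hlenpre, hprenm⟩ := (PySem.List.index?_eq_some_iff values "-" idx).1 hidx
      have hgidx : values.getD idx "" = "-" := by
        rw [hsplit, ← hlenpre, List.getD_append_right _ _ _ _ le_rfl]; simp
      have hilen : idx < values.length := by rw [hsplit]; simp; omega
      obtain ⟨hpos, hlt⟩ := hw idx hilen hgidx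
      have hprene : pre ≠ [] := by
        intro e; rw [e] at hlenpre; simp at hlenpre; omega
      obtain ⟨q, a, hqa⟩ := pre.eq_nil_or_concat.resolve_left hprene
      rw [List.concat_eq_append] at hqa
      obtain ⟨b, rest, hbr⟩ : ∃ b rest, suf = b :: rest := by
        cases suf with
        | nil => exfalso; rw [hsplit] at hlt; simp at hlt; omega
        | cons b rest => exact ⟨b, rest, rfl⟩
      subst hbr hqa
      have hsplit' : values = q ++ a :: "-" :: b :: rest := by rw [hsplit]; simp
      have hidxq : idx = q.length + 1 := by rw [← hlenpre]; simp
      have hqnm : "-" ∉ q := fun m => hprenm (List.mem_append_left _ m)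
      have hanm : a ≠ "-" := fun e => hprenm (List.mem_append_right _ (by simp [e]))
      have hcast1 : (idx : Int) - 1 = (q.length : Int) := by rw [hidxq]; push_cast; ring
      have hga : PySem.List.pyGet? values ((idx : Int) - 1) = some a := by
        rw [hcast1, hsplit']
        exact PySem.List.pyGet?_append_length q _ a
      have hgb : PySem.List.pyGet? values ((idx : Int) + 1) = some b := by
        have hcast2 : (idx : Int) + 1 = ((q ++ [a, "-"]).length : Int) := by
          rw [hidxq]; simp; ring
        rw [hcast2, hsplit']
        rw [show q ++ a :: "-" :: b :: rest = (q ++ [a, "-"]) ++ b :: rest from by simp]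
        exact PySem.List.pyGet?_append_length _ _ _
      cases hpa : PySem.Int.ofStr? a with
      | none =>
        have hcalc : calcPort a "-" b = none := by simp [calcPort, hpa]
        have hgoA : minusGo values = none := by
          rw [minusGo, if_pos hc]
          simp only [hidx, hga, hgb, hcalc]
        rw [hgoA, hsplit', List.foldl_append, fold_no_minus q [] hqnm]
        simp only [List.nil_append, List.foldl_cons]
        rw [show altStep (some (q, false)) a = some (q ++ [a], false) from by simp [altStep, hanm]]
        rw [show altStep (some (q ++ [a], false)) "-" = some (q ++ [a], true) from by simp [altStep]]
        rw [show altStep (some (q ++ [a], true)) b = none from by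
          simp [altStep, hpa]]
        rw [fold_none]
        rfl
      | some x =>
        cases hpb : PySem.Int.ofStr? b with
        | none =>
          have hcalc : calcPort a "-" b = none := by simp [calcPort, hpa, hpb]
          have hgoA : minusGo values = none := by
            rw [minusGo, if_pos hc]
            simp only [hidx, hga, hgb, hcalc]
          rw [hgoA, hsplit', List.foldl_append, fold_no_minus q [] hqnm]
          simp only [List.nil_append, List.foldl_cons]
          rw [show altStep (some (q, false)) a = some (q ++ [a], false) from by simp [altStep, hanm]]
          rw [show altStep (some (q ++ [a], false)) "-" = some (q ++ [a], true) from by simp [altStep]]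
          rw [show altStep (some (q ++ [a], true)) b = none from by
            simp [altStep, hpa, hpb]]
          rw [fold_none]
          rfl
        | some y =>
          have hcalc : calcPort a "-" b = some (x - y) := by simp [calcPort, hpa, hpb]
          have hp1 : PySem.List.pop? values ((idx : Int) - 1) = some (a, q ++ "-" :: b :: rest) := by
            rw [hcast1, hsplit']; exact pop_at q a ("-" :: b :: rest)
          have hp2 : PySem.List.pop? (q ++ "-" :: b :: rest) ((idx : Int) - 1) = some ("-", q ++ b :: rest) := by
            rw [hcast1]; exact pop_at q "-" (b :: rest)
          have hp3 : PySem.List.pop? (q ++ b :: rest) ((idx : Int) - 1) = some (b, q ++ rest) := by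
            rw [hcast1]; exact pop_at q b rest
          have hins : PySem.List.insert (q ++ rest) ((idx : Int) - 1) (PySem.Int.toStr (x - y))
              = q ++ PySem.Int.toStr (x - y) :: rest := by
            rw [hcast1, PySem.List.insert_natCast _ _ _ (by simp)]
            rw [List.take_left, List.drop_left]
          have hgoA : minusGo values = minusGo (q ++ PySem.Int.toStr (x - y) :: rest) := by
            rw [minusGo, if_pos hc]
            simp only [hidx, hga, hgb, hcalc]
            split
            next heq => rw [hp1] at heq; cases heq
            next fst l1 heq =>
              have h := Option.some.inj (hp1.symm.trans heq)
              obtain ⟨h1, h2⟩ := Prod.mk.inj h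
              subst h1 h2
              split
              next heq2 => rw [hp2] at heq2; cases heq2
              next fst2 l2 heq2 =>
                have h' := Option.some.inj (hp2.symm.trans heq2)
                obtain ⟨h3, h4⟩ := Prod.mk.inj h'
                subst h3 h4
                split
                next heq3 => rw [hp3] at heq3; cases heq3
                next fst3 l3 heq3 =>
                  have h'' := Option.some.inj (hp3.symm.trans heq3)
                  obtain ⟨h5, h6⟩ := Prod.mk.inj h''
                  subst h5 h6
                  rw [hins]
          have hWnew : Wm (q ++ PySem.Int.toStr (x - y) :: rest) :=
            W_step q a (PySem.Int.toStr (x - y)) b rest hqnm (toStr_ne_minus _) (hsplit' ▸ hw)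
          have hlnew : (q ++ PySem.Int.toStr (x - y) :: rest).length ≤ n := by
            have h1 : values.length = (q ++ PySem.Int.toStr (x - y) :: rest).length + 2 := by
              rw [hsplit']; simp; omega
            omega
          rw [hgoA, hsplit', fold_comm q a b rest x y hqnm hpa hpb, ih _ hlnew hWnew]

-- ===== VERDICT (by name: the statement is the Claim_ definition above) =====
theorem minus_spec : Claim_equal_minus := by
  unfold Claim_equal_minus
  intro values hdom hpre
  unfold Spec_minus
  have hw : Wm values := fun i hi hg => ⟨(hpre i hi hg).1, (hpre i hi hg).2.1⟩
  have hM := M values.length values le_rfl hw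
  unfold minus minus_alt
  rw [hM]
  cases h : minusGo values with
  | none => rfl
  | some out => rfl
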